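-- pv_equiv track=rewrite | github.com/lucifer-0-0-1/CP | maxsubstring.py | max_unique_substrings
-- ===== SOURCE A (Python) =====
-- def max_unique_substrings(s):
--     def backtrack(start, unique_substrings):
--         if start == len(s):
--             return len(unique_substrings)
--
--         max_count = 0
--         for end in range(start + 1, len(s) + 1):
--             substring = s[start:end]
--             if substring not in unique_substrings:
--                 unique_substrings.add(substring)
--                 max_count = max(max_count, backtrack(end, unique_substrings))
--                 unique_substrings.remove(substring)
--
--         return max_count
--
--     return backtrack(0, set())
-- ===== SOURCE B (Python) =====
-- def max_unique_substrings(s):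
--     # Iterative DFS with an explicit stack of (start, used-set) states
--     # instead of A's recursive backtracking over one mutated set.
--     n = len(s)
--     best = 0
--     stack = [(0, set())]
--     while stack:
--         start, used = stack.pop()
--         if start == n:
--             best = max(best, len(used))
--         else:
--             for end in range(start + 1, n + 1):
--                 sub = s[start:end]
--                 if sub not in used:
--                     stack.append((end, used | {sub}))
--     return best
-- ===== Notes on version B (the rewrite author's own statement) =====
-- stated objective: alternative
-- what changed: A's recursive backtracking over one shared mutated set is replaced by an iterative DFS that pops (start, used-set) states from an explicit stack, pushing an independent set copy per branch and folding the best count at the leaves.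
import Mathlib
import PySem

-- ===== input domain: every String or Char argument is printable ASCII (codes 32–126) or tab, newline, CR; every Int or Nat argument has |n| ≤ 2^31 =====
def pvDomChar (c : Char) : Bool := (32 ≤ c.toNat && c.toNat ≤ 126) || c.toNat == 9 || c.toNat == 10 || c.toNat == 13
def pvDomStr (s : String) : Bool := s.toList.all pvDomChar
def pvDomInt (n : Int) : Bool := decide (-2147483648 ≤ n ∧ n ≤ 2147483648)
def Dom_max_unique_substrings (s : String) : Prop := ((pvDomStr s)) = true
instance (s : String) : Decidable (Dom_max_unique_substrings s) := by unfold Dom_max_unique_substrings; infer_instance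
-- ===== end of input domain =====

-- B replaces A's recursive backtracking over one mutated set by an iterative DFS over an
-- explicit stack of (start, used-set) states (objective: alternative decomposition, same cost).

-- ===== PORT A =====
-- A's inner `backtrack(start, unique_substrings)` is btA; its `for end in range(start+1, len(s)+1)`
-- loop is loopA, whose counter k represents end = start + 1 + k (same iterates, same order;
-- `substring = s[start:end]` is the slice written out at each of its two uses).
-- The mutated set (add, recurse, remove) is passed functionally: the recursive call receives
-- u.add substring and the loop continues with the unchanged u, exactly what add/remove effect.
mutual
def btA (cs : List Char) (start : Nat) (u : PySem.Set (List Char)) : Int :=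
  if start = cs.length then PySem.Set.len u
  else loopA cs start 0 u 0
termination_by (cs.length - start, cs.length + 1)
decreasing_by apply Prod.Lex.right; omega

def loopA (cs : List Char) (start k : Nat) (u : PySem.Set (List Char)) (max_count : Int) : Int :=
  if h : start + 1 + k ≤ cs.length then
    loopA cs start (k + 1) u
      (if PySem.List.slice cs (some ((start : Nat) : Int)) (some ((start + 1 + k : Nat) : Int)) ∈ u
       then max_count
       else max max_count (btA cs (start + 1 + k)
         (PySem.Set.add u (PySem.List.slice cs (some ((start : Nat) : Int)) (some ((start + 1 + k : Nat) : Int))))))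
  else max_count
termination_by (cs.length - start, cs.length - (start + k))
decreasing_by
  · apply Prod.Lex.left; omega
  · apply Prod.Lex.right; omega
end

def max_unique_substrings (s : String) : Int := btA s.toList 0 PySem.Set.empty

-- ===== PORT B =====
-- childB cs start 0 u is the list of states Source B's inner for-loop pushes from state (start, u),
-- in push order (k represents end = start + 1 + k, `sub = s[start:end]` written out at each use).
def childB (cs : List Char) (start k : Nat) (u : PySem.Set (List Char)) : List (Nat × PySem.Set (List Char)) :=
  if _h : start + 1 + k ≤ cs.length then
    (if PySem.List.slice cs (some ((start : Nat) : Int)) (some ((start + 1 + k : Nat) : Int)) ∈ u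
     then []
     else [(start + 1 + k,
            PySem.Set.add u (PySem.List.slice cs (some ((start : Nat) : Int)) (some ((start + 1 + k : Nat) : Int))))])
      ++ childB cs start (k + 1) u
  else []
termination_by cs.length - (start + k)
decreasing_by omega

-- weight of a stack, used only as dfsB's termination measure
def pvW (cs : List Char) (stack : List (Nat × PySem.Set (List Char))) : Nat :=
  (stack.map (fun p => 3 ^ (cs.length - p.1))).sum

lemma pvW_childB (cs : List Char) (start : Nat) :
    ∀ j k u, cs.length ≤ start + k + j →
      2 * pvW cs (childB cs start k u) + 1 ≤ 3 ^ (cs.length - (start + k)) := by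
  intro j
  induction j with
  | zero =>
    intro k u hj
    rw [childB, dif_neg (by omega)]
    have : 1 ≤ 3 ^ (cs.length - (start + k)) := Nat.one_le_pow _ _ (by omega)
    have h0 : pvW cs ([] : List (Nat × PySem.Set (List Char))) = 0 := rfl
    rw [h0]
    omega
  | succ j ih =>
    intro k u hj
    rw [childB]
    by_cases h : start + 1 + k ≤ cs.length
    · rw [dif_pos h]
      have hm : cs.length - (start + k) = (cs.length - (start + (k + 1))) + 1 := by omega
      rw [hm, pow_succ]
      by_cases hmem : PySem.List.slice cs (some ((start : Nat) : Int)) (some ((start + 1 + k : Nat) : Int)) ∈ u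
      · rw [if_pos hmem]
        have ih' := ih (k + 1) u (by omega)
        simp only [pvW, List.map_append, List.sum_append, List.map_nil, List.sum_nil] at ih' ⊢
        omega
      · rw [if_neg hmem]
        have ih' := ih (k + 1) u (by omega)
        have h3 : 3 ^ (cs.length - (start + 1 + k)) = 3 ^ (cs.length - (start + (k + 1))) := by
          congr 1; omega
        simp only [pvW, List.map_append, List.sum_append, List.map_cons, List.map_nil,
          List.sum_cons, List.sum_nil] at ih' ⊢
        rw [h3]
        omega
    · rw [dif_neg h]
      have : 1 ≤ 3 ^ (cs.length - (start + k)) := Nat.one_le_pow _ _ (by omega)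
      have h0 : pvW cs ([] : List (Nat × PySem.Set (List Char))) = 0 := rfl
      rw [h0]
      omega

-- Source B's `while stack: start, used = stack.pop(); …`; the stack is stored top-first, so
-- Python's pop() is taking the head and the loop's appends prepend the pushed states reversed.
def dfsB (cs : List Char) (best : Int) (stack : List (Nat × PySem.Set (List Char))) : Int :=
  match stack with
  | [] => best
  | (start, u) :: rest =>
    if start = cs.length then
      dfsB cs (max best (PySem.Set.len u)) rest
    else
      dfsB cs best ((childB cs start 0 u).reverse ++ rest)
termination_by pvW cs stack
decreasing_by
  · have h1 : 1 ≤ 3 ^ (cs.length - start) := Nat.one_le_pow _ _ (by omega)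
    simp only [pvW, List.map_cons, List.sum_cons]
    omega
  · have h : 2 * pvW cs (childB cs start 0 u) + 1 ≤ 3 ^ (cs.length - start) := by
      have := pvW_childB cs start cs.length 0 u (by omega)
      simpa using this
    simp only [pvW, List.map_append, List.sum_append, List.map_reverse, List.sum_reverse,
      List.map_cons, List.sum_cons] at h ⊢
    omega

def max_unique_substrings_alt (s : String) : Int := dfsB s.toList 0 [(0, PySem.Set.empty)]

-- ===== PRECONDITION & SPEC =====
def Spec_max_unique_substrings (s : String) (out : Int) : Prop := out = max_unique_substrings_alt s
instance (s : String) (out : Int) : Decidable (Spec_max_unique_substrings s out) := by unfold Spec_max_unique_substrings; infer_instance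

-- ===== CLAIM (what is proved, stated in full; the proofs are below) =====
def Claim_equal_max_unique_substrings : Prop := ∀ (s : String), Dom_max_unique_substrings s → Spec_max_unique_substrings s (max_unique_substrings s)

-- ===== LEMMAS AND PROOFS =====

-- the fold step of the DFS invariant: fold the best with the backtracking value of each stacked state
def stepM (cs : List Char) (acc : Int) (p : Nat × PySem.Set (List Char)) : Int :=
  max acc (btA cs p.1 p.2)

lemma foldl_stepM_pull (cs : List Char) :
    ∀ (l : List (Nat × PySem.Set (List Char))) (a b : Int),
      l.foldl (stepM cs) (max a b) = max (l.foldl (stepM cs) a) b := by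
  intro l
  induction l with
  | nil => intro a b; rfl
  | cons p l ih =>
    intro a b
    simp only [List.foldl_cons, stepM]
    rw [show max (max a b) (btA cs p.1 p.2) = max (max a (btA cs p.1 p.2)) b by
      rw [max_right_comm], ih]

lemma foldl_stepM_reverse (cs : List Char) :
    ∀ (l : List (Nat × PySem.Set (List Char))) (a : Int),
      l.reverse.foldl (stepM cs) a = l.foldl (stepM cs) a := by
  intro l
  induction l with
  | nil => intro a; rfl
  | cons p l ih =>
    intro a
    simp only [List.reverse_cons, List.foldl_append, List.foldl_cons, List.foldl_nil, ih]
    show stepM cs (l.foldl (stepM cs) a) p = l.foldl (stepM cs) (stepM cs a p)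
    simp only [stepM]
    rw [← foldl_stepM_pull]

lemma loopA_ge (cs : List Char) (start : Nat) :
    ∀ j k u mc, cs.length ≤ start + k + j → mc ≤ loopA cs start k u mc := by
  intro j
  induction j with
  | zero =>
    intro k u mc hj
    rw [loopA, dif_neg (by omega)]
  | succ j ih =>
    intro k u mc hj
    rw [loopA]
    by_cases h : start + 1 + k ≤ cs.length
    · rw [dif_pos h]
      refine le_trans ?_ (ih (k + 1) u _ (by omega))
      split <;> simp
    · rw [dif_neg h]

lemma btA_nonneg (cs : List Char) (start : Nat) (u : PySem.Set (List Char)) :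
    0 ≤ btA cs start u := by
  rw [btA]
  split
  · exact Int.natCast_nonneg _
  · exact loopA_ge cs start cs.length 0 u 0 (by omega)

lemma loopA_eq_foldl (cs : List Char) (start : Nat) :
    ∀ j k u mc, cs.length ≤ start + k + j →
      loopA cs start k u mc = (childB cs start k u).foldl (stepM cs) mc := by
  intro j
  induction j with
  | zero =>
    intro k u mc hj
    rw [loopA, dif_neg (by omega), childB, dif_neg (by omega)]
    rfl
  | succ j ih =>
    intro k u mc hj
    rw [loopA, childB]
    by_cases h : start + 1 + k ≤ cs.length
    · rw [dif_pos h, dif_pos h]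
      by_cases hmem : PySem.List.slice cs (some ((start : Nat) : Int)) (some ((start + 1 + k : Nat) : Int)) ∈ u
      · rw [if_pos hmem, if_pos hmem, List.nil_append, ih (k + 1) u _ (by omega)]
      · rw [if_neg hmem, if_neg hmem, List.singleton_append, List.foldl_cons,
          ih (k + 1) u _ (by omega)]
        rfl
    · rw [dif_neg h, dif_neg h]
      rfl

lemma btA_eq_foldl_childB (cs : List Char) (start : Nat) (u : PySem.Set (List Char))
    (h : start ≠ cs.length) :
    btA cs start u = (childB cs start 0 u).foldl (stepM cs) 0 := by
  rw [btA, if_neg h]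
  exact loopA_eq_foldl cs start cs.length 0 u 0 (by omega)

lemma dfsB_eq_foldl (cs : List Char) :
    ∀ n stack best, pvW cs stack ≤ n → 0 ≤ best →
      dfsB cs best stack = stack.foldl (stepM cs) best := by
  intro n
  induction n with
  | zero =>
    intro stack best hW hb
    match stack with
    | [] => rw [dfsB]; rfl
    | (start, u) :: rest =>
      exfalso
      have hw1 : 1 ≤ 3 ^ (cs.length - start) := Nat.one_le_pow _ _ (by omega)
      have hWc : pvW cs ((start, u) :: rest) = 3 ^ (cs.length - start) + pvW cs rest := by
        simp [pvW]
      omega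
  | succ n ih =>
    intro stack best hW hb
    match stack with
    | [] => rw [dfsB]; rfl
    | (start, u) :: rest =>
      have hw1 : 1 ≤ 3 ^ (cs.length - start) := Nat.one_le_pow _ _ (by omega)
      have hWc : pvW cs ((start, u) :: rest) = 3 ^ (cs.length - start) + pvW cs rest := by
        simp [pvW]
      rw [dfsB]
      by_cases h : start = cs.length
      · rw [if_pos h]
        rw [ih rest (max best (PySem.Set.len u)) (by omega) (le_max_of_le_left hb)]
        simp only [List.foldl_cons, stepM]
        congr 2
        rw [btA, if_pos h]
      · rw [if_neg h]
        have hWch : 2 * pvW cs (childB cs start 0 u) + 1 ≤ 3 ^ (cs.length - start) := by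
          have := pvW_childB cs start cs.length 0 u (by omega)
          simpa using this
        have hWa : pvW cs ((childB cs start 0 u).reverse ++ rest) =
            pvW cs (childB cs start 0 u) + pvW cs rest := by
          simp [pvW, List.sum_reverse]
        rw [ih ((childB cs start 0 u).reverse ++ rest) best (by omega) hb]
        rw [List.foldl_append, foldl_stepM_reverse]
        simp only [List.foldl_cons]
        congr 1
        have hb' : max 0 best = best := max_eq_right hb
        rw [show best = max 0 best from hb'.symm, foldl_stepM_pull]
        simp only [stepM]
        rw [btA_eq_foldl_childB cs start u h, max_eq_right hb]
        exact max_comm _ _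

-- ===== VERDICT (by name: the statement is the Claim_ definition above) =====
theorem max_unique_substrings_spec : Claim_equal_max_unique_substrings := by
  intro s _
  unfold Spec_max_unique_substrings max_unique_substrings max_unique_substrings_alt
  rw [dfsB_eq_foldl s.toList (pvW s.toList [(0, PySem.Set.empty)]) _ 0 le_rfl le_rfl]
  simp only [List.foldl_cons, List.foldl_nil, stepM]
  exact (max_eq_right (btA_nonneg s.toList 0 PySem.Set.empty)).symm
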